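-- pv_equiv track=rewrite | github.com/cdhorn/CardView | src/view/groups/group_builder.py | prepare_reference_items
-- ===== SOURCE A (Python) =====
-- def prepare_reference_items(obj_types, obj_list):
--     """
--     Prepare sorted item list.
--     """
--     total = 0
--     tuple_list = []
--     handle_cache = []
--     if not obj_types:
--         for item in obj_list:
--             if item[1] not in handle_cache:
--                 tuple_list.append(item)
--                 handle_cache.append(item[1])
--                 total = total + 1
--     else:
--         for obj_type, handle in obj_list:
--             if obj_type in obj_types and handle not in handle_cache:
--                 tuple_list.append((obj_type, handle))
--                 handle_cache.append(handle)
--                 total = total + 1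
--     del handle_cache
--     tuple_list.sort(key=lambda x: x[0])
--     return total, tuple_list
-- ===== SOURCE B (Python) =====
-- def prepare_reference_items(obj_types, obj_list):
--     """
--     Prepare sorted item list.
--     """
--     seen = set()
--     buckets = {}
--     for obj_type, handle in obj_list:
--         if (not obj_types or obj_type in obj_types) and handle not in seen:
--             seen.add(handle)
--             buckets.setdefault(obj_type, []).append(handle)
--     result = []
--     for key in sorted(buckets):
--         result.extend((key, handle) for handle in buckets[key])
--     return len(result), result
-- ===== Notes on version B (the rewrite author's own statement) =====
-- stated objective: alternative
-- what changed: Instead of building one flat filtered/deduped list with a list-based handle cache and then stably sorting the whole list, B makes one pass with a set of seen handles, grouping surviving handles into per-type buckets, and flattens the buckets in sorted-key order.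
import Mathlib
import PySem

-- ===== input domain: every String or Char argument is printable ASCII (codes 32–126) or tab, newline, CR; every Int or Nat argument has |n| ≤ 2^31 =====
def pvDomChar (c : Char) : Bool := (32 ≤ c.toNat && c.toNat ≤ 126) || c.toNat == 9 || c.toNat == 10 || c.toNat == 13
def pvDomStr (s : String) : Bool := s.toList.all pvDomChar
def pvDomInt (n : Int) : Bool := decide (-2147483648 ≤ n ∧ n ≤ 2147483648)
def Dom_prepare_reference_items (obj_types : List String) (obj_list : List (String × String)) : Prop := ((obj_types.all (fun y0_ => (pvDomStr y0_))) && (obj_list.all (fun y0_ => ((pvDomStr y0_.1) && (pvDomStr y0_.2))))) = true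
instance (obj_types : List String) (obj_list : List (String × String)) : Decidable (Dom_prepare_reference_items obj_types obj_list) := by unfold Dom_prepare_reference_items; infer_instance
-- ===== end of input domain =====

-- B replaces A's "filter/dedup into a flat list, then stable-sort it" by "group surviving
-- items into per-type buckets in one pass (set-based dedup), then flatten the buckets in
-- sorted key order" (objective: alternative decomposition).

-- ===== PORT A =====
def prepare_reference_items (obj_types : List String) (obj_list : List (String × String)) : Int × (List (String × String)) :=
  -- state s = (total, tuple_list, handle_cache)
  let s :=
    if obj_types.isEmpty then
      obj_list.foldl (fun s item =>
        if !(s.2.2.contains item.2) then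
          (s.1 + 1, s.2.1 ++ [item], s.2.2 ++ [item.2])
        else s)
        ((0 : Int), ([] : List (String × String)), ([] : List String))
    else
      obj_list.foldl (fun s p =>
        if obj_types.contains p.1 && !(s.2.2.contains p.2) then
          (s.1 + 1, s.2.1 ++ [(p.1, p.2)], s.2.2 ++ [p.2])
        else s)
        ((0 : Int), ([] : List (String × String)), ([] : List String))
  (s.1, PySem.List.sorted s.2.1 (fun x => x.1))

-- ===== PORT B =====
def prepare_reference_items_alt (obj_types : List String) (obj_list : List (String × String)) : Int × (List (String × String)) :=
  -- state s = (seen, buckets); `buckets.setdefault(t, []).append(h)` is `modify t [] (· ++ [h])`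
  let s :=
    obj_list.foldl (fun s p =>
      if (obj_types.isEmpty || obj_types.contains p.1) && !(PySem.Set.contains s.1 p.2) then
        (PySem.Set.add s.1 p.2, s.2.modify p.1 [] (fun hs => hs ++ [p.2]))
      else s)
      ((PySem.Set.empty : PySem.Set String), (PySem.Dict.empty : PySem.Dict String (List String)))
  let result :=
    (PySem.List.sorted s.2.keys (fun k => k)).foldl
      (fun acc k => acc ++ (s.2.getD k []).map (fun h => (k, h))) ([] : List (String × String))
  ((result.length : Int), result)

-- ===== PRECONDITION & SPEC =====
def Spec_prepare_reference_items (obj_types : List String) (obj_list : List (String × String)) (out : Int × (List (String × String))) : Prop := out = prepare_reference_items_alt obj_types obj_list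
instance (obj_types : List String) (obj_list : List (String × String)) (out : Int × (List (String × String))) : Decidable (Spec_prepare_reference_items obj_types obj_list out) := by unfold Spec_prepare_reference_items; infer_instance

-- ===== CLAIM (what is proved, stated in full; the proofs are below) =====
def Claim_equal_prepare_reference_items : Prop := ∀ (obj_types : List String) (obj_list : List (String × String)), Dom_prepare_reference_items obj_types obj_list → Spec_prepare_reference_items obj_types obj_list (prepare_reference_items obj_types obj_list)

-- ===== LEMMAS AND PROOFS =====

-- pvG τ l cache: the items of l that survive the type filter τ and the sequential
-- dedup-by-handle starting from the given handle cache.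
def pvG (τ : String → Bool) : List (String × String) → List String → List (String × String)
  | [], _ => []
  | p :: r, cache =>
    if τ p.1 && !(cache.contains p.2) then p :: pvG τ r (cache ++ [p.2]) else pvG τ r cache

theorem pvG_congr (τ τ' : String → Bool) (h : ∀ t, τ t = τ' t) :
    ∀ (l : List (String × String)) (cache : List String), pvG τ l cache = pvG τ' l cache := by
  intro l
  induction l with
  | nil => intro cache; rfl
  | cons p r ih =>
    intro cache
    simp only [pvG, h p.1]
    split <;> simp [ih]

theorem pv_foldA (τ : String → Bool) (l : List (String × String)) (n : Int)
    (tl : List (String × String)) (cache : List String) :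
    l.foldl (fun s p =>
        if τ p.1 && !(s.2.2.contains p.2) then (s.1 + 1, s.2.1 ++ [p], s.2.2 ++ [p.2]) else s)
      (n, tl, cache)
    = (n + ((pvG τ l cache).length : Int), tl ++ pvG τ l cache,
       cache ++ (pvG τ l cache).map (fun p => p.2)) := by
  induction l generalizing n tl cache with
  | nil => simp [pvG]
  | cons p r ih =>
    simp only [List.foldl_cons, pvG]
    by_cases hc : (τ p.1 && !(cache.contains p.2)) = true
    · rw [if_pos hc, if_pos hc, ih]
      simp
      omega
    · rw [if_neg hc, if_neg hc, ih]

theorem pv_foldB (τ : String → Bool) (l : List (String × String)) (cache : PySem.Set String)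
    (d : PySem.Dict String (List String)) :
    l.foldl (fun s p =>
        if τ p.1 && !(PySem.Set.contains s.1 p.2) then
          (PySem.Set.add s.1 p.2, s.2.modify p.1 [] (fun hs => hs ++ [p.2]))
        else s)
      (cache, d)
    = (cache ++ (pvG τ l cache).map (fun p => p.2),
       (pvG τ l cache).foldl (fun d p => d.modify p.1 [] (fun hs => hs ++ [p.2])) d) := by
  induction l generalizing cache d with
  | nil => simp [pvG]
  | cons p r ih =>
    simp only [List.foldl_cons, pvG]
    by_cases hc : (τ p.1 && !(PySem.Set.contains cache p.2)) = true
    have hc' : (τ p.1 && !(List.contains cache p.2)) = true := by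
      simpa using hc
    · have hnm : p.2 ∉ cache := by
        simp only [Bool.and_eq_true, Bool.not_eq_true'] at hc'
        simpa using hc'.2
      rw [if_pos hc, if_pos hc', PySem.Set.add_of_not_mem hnm, ih]
      simp
    · have hc' : ¬(τ p.1 && !(List.contains cache p.2)) = true := by
        simpa using hc
      rw [if_neg hc, if_neg hc', ih]

theorem pv_insertBy_all (before : (String × String) → (String × String) → Bool)
    (x : String × String) (l : List (String × String))
    (h : ∀ y ∈ l, before x y = true) :
    PySem.List.insertBy before x l = x :: l := by
  cases l with
  | nil => rfl
  | cons y ys => simp [PySem.List.insertBy, h y (by simp)]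

theorem pv_insertBy_skip (before : (String × String) → (String × String) → Bool)
    (x : String × String) (l₁ l₂ : List (String × String))
    (h : ∀ y ∈ l₁, before x y = false) :
    PySem.List.insertBy before x (l₁ ++ l₂) = l₁ ++ PySem.List.insertBy before x l₂ := by
  induction l₁ with
  | nil => rfl
  | cons y ys ih =>
    simp only [List.cons_append, PySem.List.insertBy, h y (by simp)]
    simp [ih (fun z hz => h z (by simp [hz]))]

theorem pv_flatMap_congr {α β : Type} (l : List α) (f g : α → List β)
    (h : ∀ k ∈ l, f k = g k) : l.flatMap f = l.flatMap g := by
  induction l with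
  | nil => rfl
  | cons a r ih =>
    simp only [List.flatMap_cons, h a (by simp), ih (fun k hk => h k (by simp [hk]))]

theorem pv_crux (K : List String) (hK : K.Pairwise (· < ·))
    (b : String → List (String × String))
    (hb : ∀ k ∈ K, ∀ p ∈ b k, p.1 = k) (x : String × String)
    (hx : x.1 ∉ K → b x.1 = []) :
    PySem.List.insertBy (fun a c => decide (a.1 < c.1)) x (K.flatMap b)
    = (if x.1 ∈ K then K else PySem.List.insertBy (fun a c => decide (a < c)) x.1 K).flatMap
        (fun k => if k = x.1 then b k ++ [x] else b k) := by
  induction K with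
  | nil =>
    have hbx : b x.1 = [] := hx (by simp)
    rw [if_neg (List.not_mem_nil)]
    simp [PySem.List.insertBy, hbx]
  | cons k K' ih =>
    have hKlt : ∀ k' ∈ K', k < k' := by
      intro k' hk'
      exact (List.pairwise_cons.mp hK).1 k' hk'
    have hK' : K'.Pairwise (· < ·) := (List.pairwise_cons.mp hK).2
    rcases lt_trichotomy x.1 k with hlt | heq | hgt
    · -- x.1 < k : x goes to the very front as a fresh first bucket
      have hnotmem : x.1 ∉ k :: K' := by
        intro hm
        rcases List.mem_cons.mp hm with h1 | h2
        · exact absurd h1 (ne_of_lt hlt)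
        · exact absurd (hKlt _ h2) (by intro h; exact absurd (lt_trans hlt h) (lt_irrefl x.1))
      have hbx : b x.1 = [] := hx hnotmem
      have hall : ∀ y ∈ (k :: K').flatMap b, (fun a c => decide (a.1 < c.1)) x y = true := by
        intro y hy
        rcases List.mem_flatMap.mp hy with ⟨k', hk', hyb⟩
        have hy1 : y.1 = k' := hb k' hk' y hyb
        have : x.1 < k' := by
          rcases List.mem_cons.mp hk' with h1 | h2
          · exact h1 ▸ hlt
          · exact lt_trans hlt (hKlt _ h2)
        simp [hy1, this]
      rw [pv_insertBy_all _ _ _ hall, if_neg hnotmem]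
      have hins : PySem.List.insertBy (fun a c => decide (a < c)) x.1 (k :: K')
          = x.1 :: k :: K' := by
        simp [PySem.List.insertBy, hlt]
      rw [hins]
      have hKne : ∀ k' ∈ k :: K', ¬ k' = x.1 := fun k' hk' h => hnotmem (h ▸ hk')
      simp only [List.flatMap_cons]
      rw [pv_flatMap_congr K' _ b (fun k' hk' => if_neg (hKne k' (by simp [hk'])))]
      simp [hbx, hKne k (by simp)]
    · -- x.1 = k : x appended at the end of bucket k
      have hmem : x.1 ∈ k :: K' := by simp [heq]
      have hskip : ∀ y ∈ b k, (fun a c => decide (a.1 < c.1)) x y = false := by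
        intro y hy
        have : y.1 = k := hb k (by simp) y hy
        simp [this, heq]
      have hall : ∀ y ∈ K'.flatMap b, (fun a c => decide (a.1 < c.1)) x y = true := by
        intro y hy
        rcases List.mem_flatMap.mp hy with ⟨k', hk', hyb⟩
        have hy1 : y.1 = k' := hb k' (by simp [hk']) y hyb
        simp [hy1, heq ▸ hKlt _ hk']
      rw [List.flatMap_cons, pv_insertBy_skip _ _ _ _ hskip, pv_insertBy_all _ _ _ hall,
        if_pos hmem]
      have hKne : ∀ k' ∈ K', ¬ k' = x.1 := by
        intro k' hk' h
        exact absurd (hKlt _ hk') (by rw [h, ← heq]; exact lt_irrefl x.1)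
      simp only [List.flatMap_cons]
      rw [pv_flatMap_congr K' _ b (fun k' hk' => if_neg (hKne k' hk'))]
      simp [heq]
    · -- k < x.1 : skip bucket k and recurse
      have hxk : ¬ x.1 = k := fun h => absurd hgt (by simp [h])
      have hskip : ∀ y ∈ b k, (fun a c => decide (a.1 < c.1)) x y = false := by
        intro y hy
        have hyk : y.1 = k := hb k (by simp) y hy
        show decide (x.1 < y.1) = false
        rw [hyk]
        exact decide_eq_false (not_lt_of_gt hgt)
      have hb' : ∀ k' ∈ K', ∀ p ∈ b k', p.1 = k' := fun k' hk' => hb k' (by simp [hk'])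
      have hx' : x.1 ∉ K' → b x.1 = [] := by
        intro hnm
        exact hx (by simp [hxk, hnm])
      rw [List.flatMap_cons, pv_insertBy_skip _ _ _ _ hskip, ih hK' hb' hx']
      by_cases hmem : x.1 ∈ K'
      · rw [if_pos hmem, if_pos (by simp [hmem])]
        simp only [List.flatMap_cons]
        rw [if_neg (fun h => hxk h.symm)]
      · rw [if_neg hmem, if_neg (by simp [hxk, hmem])]
        have hins : PySem.List.insertBy (fun a c => decide (a < c)) x.1 (k :: K')
            = k :: PySem.List.insertBy (fun a c => decide (a < c)) x.1 K' := by
          simp [PySem.List.insertBy, not_lt_of_gt hgt]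
        rw [hins]
        simp only [List.flatMap_cons]
        rw [if_neg (fun h => hxk h.symm)]

theorem pv_main (F : List (String × String)) :
    PySem.List.sorted F (fun p => p.1)
    = (PySem.List.sorted (PySem.Set.ofList (F.map (fun p => p.1))) (fun k => k)).flatMap
        (fun k => F.filter (fun p => p.1 == k)) := by
  induction F using List.reverseRecOn with
  | nil => rfl
  | append_singleton F x ih =>
    have hK : (PySem.List.sorted (PySem.Set.ofList (F.map (fun p => p.1))) (fun k => k)).Pairwise
        (· < ·) := PySem.List.sorted_ofList_pairwise_lt _
    have hL : PySem.List.sorted (F ++ [x]) (fun p => p.1)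
        = PySem.List.insertBy (fun a c => decide (a.1 < c.1)) x
            (PySem.List.sorted F (fun p => p.1)) := by
      rw [PySem.List.sorted_eq_foldl_insertBy, PySem.List.sorted_eq_foldl_insertBy,
        List.foldl_append]
      rfl
    have hb : ∀ k ∈ PySem.List.sorted (PySem.Set.ofList (F.map (fun p => p.1))) (fun k => k),
        ∀ p ∈ F.filter (fun p => p.1 == k), p.1 = k := by
      intro k _ p hp
      simpa using (List.mem_filter.mp hp).2
    have hx : x.1 ∉ PySem.List.sorted (PySem.Set.ofList (F.map (fun p => p.1))) (fun k => k) →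
        F.filter (fun p => p.1 == x.1) = [] := by
      intro hnm
      rw [PySem.List.mem_sorted, PySem.Set.mem_ofList] at hnm
      rw [List.filter_eq_nil_iff]
      intro p hp hpx
      exact hnm (List.mem_map.mpr ⟨p, hp, by simpa using hpx⟩)
    have hbb : (fun k => if k = x.1 then (F.filter (fun p => p.1 == k)) ++ [x]
          else F.filter (fun p => p.1 == k))
        = (fun k => (F ++ [x]).filter (fun p => p.1 == k)) := by
      funext k
      by_cases hk : k = x.1
      · subst hk
        simp [List.filter_append]
      · rw [if_neg hk, List.filter_append]
        have : ((fun p => p.1 == k) x) = false := by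
          simpa using fun h => hk (by rw [h])
        simp [this]
    rw [hL, ih, pv_crux _ hK _ hb x hx, hbb]
    by_cases hm : x.1 ∈ PySem.List.sorted (PySem.Set.ofList (F.map (fun p => p.1))) (fun k => k)
    · have hmS : x.1 ∈ PySem.Set.ofList (F.map (fun p => p.1)) :=
        (PySem.List.mem_sorted _ _ _ _).mp hm
      have hkeys : PySem.Set.ofList ((F ++ [x]).map (fun p => p.1))
          = PySem.Set.ofList (F.map (fun p => p.1)) := by
        rw [List.map_append, List.map_singleton, PySem.Set.ofList_append_singleton,
          PySem.Set.add_of_mem hmS]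
      rw [if_pos hm, hkeys]
    · have hmS : x.1 ∉ PySem.Set.ofList (F.map (fun p => p.1)) := by
        rw [← PySem.List.mem_sorted (key := fun k => k) (rev := false)]
        exact hm
      have hkeys : PySem.Set.ofList ((F ++ [x]).map (fun p => p.1))
          = PySem.Set.ofList (F.map (fun p => p.1)) ++ [x.1] := by
        rw [List.map_append, List.map_singleton, PySem.Set.ofList_append_singleton,
          PySem.Set.add_of_not_mem hmS]
      rw [if_neg hm, hkeys]
      conv_rhs => rw [PySem.List.sorted_eq_foldl_insertBy, List.foldl_append]
      rw [← PySem.List.sorted_eq_foldl_insertBy]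
      rfl

theorem pv_bucket (G : List (String × String)) (k : String) :
    ((G.filter (fun p => p.1 == k)).map (fun p => p.2)).map (fun h => (k, h))
    = G.filter (fun p => p.1 == k) := by
  rw [List.map_map]
  conv_rhs => rw [← List.map_id (G.filter (fun p => p.1 == k))]
  apply List.map_congr_left
  intro p hp
  have h1 : p.1 = k := by simpa using (List.mem_filter.mp hp).2
  show (k, p.2) = p
  rw [← h1]

theorem pv_altB (ts : List String) (l : List (String × String)) :
    prepare_reference_items_alt ts l
    = (((pvG (fun t => ts.isEmpty || ts.contains t) l []).length : Int),
       PySem.List.sorted (pvG (fun t => ts.isEmpty || ts.contains t) l []) (fun p => p.1)) := by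
  simp only [prepare_reference_items_alt]
  rw [pv_foldB (fun t => ts.isEmpty || ts.contains t) l
    (PySem.Set.empty : PySem.Set String) (PySem.Dict.empty : PySem.Dict String (List String))]
  simp only [show (PySem.Set.empty : PySem.Set String) = ([] : List String) from rfl]
  set G := pvG (fun t => ts.isEmpty || ts.contains t) l [] with hGdef
  have hkeys : ((G.foldl (fun d p => d.modify p.1 [] (fun hs => hs ++ [p.2]))
      (PySem.Dict.empty : PySem.Dict String (List String)))).keys
      = PySem.Set.ofList (G.map (fun p => p.1)) := by
    rw [PySem.Dict.keys_foldl_modify_key G (fun p => p.1) []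
      (fun _ p => (fun hs => hs ++ [p.2]))]
    simp [PySem.Set.update_nil_left]
  have hresult : (PySem.List.sorted ((G.foldl (fun d p => d.modify p.1 [] (fun hs => hs ++ [p.2]))
        (PySem.Dict.empty : PySem.Dict String (List String)))).keys (fun k => k)).foldl
      (fun acc k => acc ++ (((G.foldl (fun d p => d.modify p.1 [] (fun hs => hs ++ [p.2]))
        (PySem.Dict.empty : PySem.Dict String (List String)))).getD k []).map (fun h => (k, h)))
      ([] : List (String × String))
      = PySem.List.sorted G (fun p => p.1) := by
    rw [hkeys, PySem.List.foldl_append_eq_flatMap, List.nil_append, pv_main]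
    apply pv_flatMap_congr
    intro k _
    rw [PySem.Dict.getD_foldl_modify_append, PySem.Dict.getD_empty, List.nil_append, pv_bucket]
  simp only [hresult]
  rw [PySem.List.length_sorted]

theorem pv_AB (ts : List String) (l : List (String × String)) :
    prepare_reference_items ts l = prepare_reference_items_alt ts l := by
  rw [pv_altB]
  simp only [prepare_reference_items]
  by_cases hts : ts.isEmpty
  · rw [if_pos hts]
    have hfn : (fun (s : Int × List (String × String) × List String) (item : String × String) =>
          if !(s.2.2.contains item.2) then (s.1 + 1, s.2.1 ++ [item], s.2.2 ++ [item.2]) else s)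
        = (fun s p =>
          if (fun (_ : String) => true) p.1 && !(s.2.2.contains p.2) then
            (s.1 + 1, s.2.1 ++ [p], s.2.2 ++ [p.2]) else s) := by
      funext s p
      simp
    rw [hfn, pv_foldA (fun _ => true) l 0 [] []]
    rw [pvG_congr (fun t => ts.isEmpty || ts.contains t) (fun _ => true) (fun t => by simp [hts]) l []]
    simp
  · rw [if_neg hts]
    rw [pv_foldA (fun t => ts.contains t) l 0 [] []]
    rw [pvG_congr (fun t => ts.isEmpty || ts.contains t) (fun t => ts.contains t)
      (fun t => by simp [hts]) l []]
    simp

-- ===== VERDICT (by name: the statement is the Claim_ definition above) =====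
theorem prepare_reference_items_spec : Claim_equal_prepare_reference_items := by
  intro ts l _
  exact pv_AB ts l
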